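-- pv_equiv track=rewrite | github.com/rebryant/pkc-artifact | tools/merge_csv.py | merge
-- ===== SOURCE A (Python) =====
-- def merge(entries1, count1, entries2, count2, subset = True, default = None):
--     entries = {}
--     dfill = "" if default is None else default
--     for k in entries1.keys():
--         entry1 = entries1[k]
--         if k in entries2:
--             entry2 = entries2[k]
--             entries[k] = entry1 + entry2
--         elif not subset:
--             entry2 = [dfill] * count2
--             entries[k] = entry1 + entry2
--     if not subset:
--         for k in entries2.keys():
--             if k in entries1:
--                 continue
--             entry1 = [dfill] * count1
--             entry2 = entries2[k]
--             entries[k] = entry1 + entry2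
--     return entries
-- ===== SOURCE B (Python) =====
-- def merge(entries1, count1, entries2, count2, subset = True, default = None):
--     dfill = "" if default is None else default
--     if subset:
--         # inner join: intersection of the key sets, entries1 order
--         return {k: v + entries2[k] for k, v in entries1.items() if k in entries2}
--     # outer join: first pad each table to the union schema, then concatenate blindly
--     t1 = {**entries1, **{k: [dfill] * count1 for k in entries2 if k not in entries1}}
--     t2 = {**entries2, **{k: [dfill] * count2 for k in entries1 if k not in entries2}}
--     return {k: t1[k] + t2[k] for k in t1}
-- ===== Notes on version B (the rewrite author's own statement) =====
-- stated objective: alternative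
-- what changed: A interleaves filling and merging in two conditional loops (an entries1 pass with subset/fill branching, then an entries2-only fill pass); B instead returns one intersection comprehension in subset mode and, in outer mode, first pads both tables to the union schema ({**entries1, **pad}) and then concatenates rows unconditionally with no per-key branching.
import Mathlib
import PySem

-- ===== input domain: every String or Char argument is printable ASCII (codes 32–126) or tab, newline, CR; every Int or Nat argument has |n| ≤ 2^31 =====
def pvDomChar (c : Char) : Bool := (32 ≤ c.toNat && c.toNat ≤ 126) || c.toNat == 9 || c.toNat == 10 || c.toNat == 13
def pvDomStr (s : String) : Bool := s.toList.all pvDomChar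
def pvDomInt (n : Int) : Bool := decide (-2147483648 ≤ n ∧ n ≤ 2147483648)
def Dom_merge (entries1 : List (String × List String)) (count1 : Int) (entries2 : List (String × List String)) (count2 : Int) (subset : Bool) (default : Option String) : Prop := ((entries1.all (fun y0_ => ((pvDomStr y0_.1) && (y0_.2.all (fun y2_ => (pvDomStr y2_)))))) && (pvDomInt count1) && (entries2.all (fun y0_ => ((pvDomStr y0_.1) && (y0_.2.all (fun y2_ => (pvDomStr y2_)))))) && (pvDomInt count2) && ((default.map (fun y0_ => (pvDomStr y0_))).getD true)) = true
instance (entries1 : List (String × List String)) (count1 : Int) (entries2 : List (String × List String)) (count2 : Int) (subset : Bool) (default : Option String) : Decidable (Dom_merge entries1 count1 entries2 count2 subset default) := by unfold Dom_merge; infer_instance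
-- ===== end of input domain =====

-- B replaces A's two conditional merge loops by: subset mode, one intersection
-- comprehension; outer mode, padding both tables to the union schema first and then an
-- unconditional row concatenation (objective: alternative decomposition, same cost).

-- ===== PORT A =====
-- dict arguments are association lists; as in Python they are read through PySem.Dict.ofList.
def merge (entries1 : List (String × List String)) (count1 : Int) (entries2 : List (String × List String)) (count2 : Int) (subset : Bool) (default : Option String) : List (String × List String) :=
  let d1 : PySem.Dict String (List String) := PySem.Dict.ofList entries1
  let d2 : PySem.Dict String (List String) := PySem.Dict.ofList entries2
  let dfill : String := match default with | none => "" | some d => d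
  -- first loop: for k in entries1.keys()
  let entries : PySem.Dict String (List String) :=
    d1.keys.foldl (fun entries k =>
      if d2.contains k then
        entries.insert k (d1.getD k [] ++ d2.getD k [])
      else if !subset then
        entries.insert k (d1.getD k [] ++ List.replicate count2.toNat dfill)
      else entries) PySem.Dict.empty
  -- second loop: only when not subset, over entries2.keys()
  let entries :=
    if !subset then
      d2.keys.foldl (fun entries k =>
        if d1.contains k then entries
        else entries.insert k (List.replicate count1.toNat dfill ++ d2.getD k [])) entries
    else entries
  entries.items

-- ===== PORT B =====
def merge_alt (entries1 : List (String × List String)) (count1 : Int) (entries2 : List (String × List String)) (count2 : Int) (subset : Bool) (default : Option String) : List (String × List String) :=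
  let d1 : PySem.Dict String (List String) := PySem.Dict.ofList entries1
  let d2 : PySem.Dict String (List String) := PySem.Dict.ofList entries2
  let dfill : String := match default with | none => "" | some d => d
  if subset then
    -- {k: v + entries2[k] for k, v in entries1.items() if k in entries2}
    -- (entries2[k] is total here: the guard checked membership, so getD is exact)
    (d1.items.foldl (fun e p =>
        if d2.contains p.1 then e.insert p.1 (p.2 ++ d2.getD p.1 []) else e)
      PySem.Dict.empty).items
  else
    -- {k: [dfill]*count1 for k in entries2 if k not in entries1}
    let pad1 : PySem.Dict String (List String) :=
      d2.keys.foldl (fun e k =>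
        if !d1.contains k then e.insert k (List.replicate count1.toNat dfill) else e)
        PySem.Dict.empty
    let pad2 : PySem.Dict String (List String) :=
      d1.keys.foldl (fun e k =>
        if !d2.contains k then e.insert k (List.replicate count2.toNat dfill) else e)
        PySem.Dict.empty
    -- t1 = {**entries1, **pad1},  t2 = {**entries2, **pad2}
    let t1 : PySem.Dict String (List String) := pad1.items.foldl (fun d p => d.insert p.1 p.2) d1
    let t2 : PySem.Dict String (List String) := pad2.items.foldl (fun d p => d.insert p.1 p.2) d2
    -- {k: t1[k] + t2[k] for k in t1}  (t1[k], t2[k] are total: both tables carry every key)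
    (t1.keys.foldl (fun e k => e.insert k (t1.getD k [] ++ t2.getD k [])) PySem.Dict.empty).items

-- ===== PRECONDITION & SPEC =====
def Spec_merge (entries1 : List (String × List String)) (count1 : Int) (entries2 : List (String × List String)) (count2 : Int) (subset : Bool) (default : Option String) (out : List (String × List String)) : Prop := out = merge_alt entries1 count1 entries2 count2 subset default
instance (entries1 : List (String × List String)) (count1 : Int) (entries2 : List (String × List String)) (count2 : Int) (subset : Bool) (default : Option String) (out : List (String × List String)) : Decidable (Spec_merge entries1 count1 entries2 count2 subset default out) := by unfold Spec_merge; infer_instance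

-- ===== CLAIM =====
def Claim_equal_merge : Prop := ∀ (entries1 : List (String × List String)) (count1 : Int) (entries2 : List (String × List String)) (count2 : Int) (subset : Bool) (default : Option String), Dom_merge entries1 count1 entries2 count2 subset default → Spec_merge entries1 count1 entries2 count2 subset default (merge entries1 count1 entries2 count2 subset default)

-- ===== LEMMAS AND PROOFS =====

-- a loop that inserts in both branches is a loop with a single conditional insert
theorem branch_insert_fuse (d1 d2 : PySem.Dict String (List String)) (fill2 : List String)
    (init : PySem.Dict String (List String)) :
    d1.keys.foldl (fun e k =>
        if d2.contains k then e.insert k (d1.getD k [] ++ d2.getD k [])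
        else e.insert k (d1.getD k [] ++ fill2)) init
    = d1.keys.foldl (fun e k =>
        e.insert k (d1.getD k [] ++ (if d2.contains k then d2.getD k [] else fill2))) init := by
  apply PySem.List.foldl_congr_mem
  intro acc k _
  by_cases h : d2.contains k = true <;> simp [h]

-- a loop that skips present keys is a loop over the filtered key list
theorem skip_to_filter (d1 d2 : PySem.Dict String (List String)) (fill1 : List String)
    (init : PySem.Dict String (List String)) :
    d2.keys.foldl (fun e k =>
        if d1.contains k then e else e.insert k (fill1 ++ d2.getD k [])) init
    = (d2.keys.filter (fun k => !d1.contains k)).foldl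
        (fun e k => e.insert k (fill1 ++ d2.getD k [])) init := by
  rw [← PySem.List.foldl_if_eq_foldl_filter (fun k => !d1.contains k)
      (fun e k => e.insert k (fill1 ++ d2.getD k [])) d2.keys init]
  apply PySem.List.foldl_congr_mem
  intro acc k _
  by_cases h : d1.contains k = true <;> simp [h]

-- the padding comprehension: items of a conditional-insert fold over fresh keys
theorem pad_items (da db : PySem.Dict String (List String)) (fill : List String)
    (hb : db.keys.Nodup) :
    (db.keys.foldl (fun e k =>
        if !da.contains k then e.insert k fill else e) PySem.Dict.empty).items
    = (db.keys.filter (fun k => !da.contains k)).map (fun k => (k, fill)) := by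
  rw [PySem.List.foldl_if_eq_foldl_filter (fun k => !da.contains k)
      (fun e k => e.insert k fill) db.keys PySem.Dict.empty]
  have := PySem.Dict.items_foldl_insert_fresh (db.keys.filter (fun k => !da.contains k))
    (fun k => k) (fun _ => fill) PySem.Dict.empty
    (fun a _ => PySem.Dict.contains_empty a) (by simpa using hb.filter _)
  simpa using this

-- {**d, **pad} for fresh distinct pad keys: items are d.items followed by the pad rows
theorem union_items (d : PySem.Dict String (List String)) (ks : List String)
    (fill : List String) (hnd : ks.Nodup) (hfresh : ∀ k ∈ ks, d.contains k = false) :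
    ((ks.map (fun k => (k, fill))).foldl (fun d p => d.insert p.1 p.2) d).items
    = d.items ++ ks.map (fun k => (k, fill)) := by
  rw [List.foldl_map]
  have := PySem.Dict.items_foldl_insert_fresh ks (fun k => k) (fun _ => fill) d hfresh
    (by simpa using hnd)
  simpa using this

-- core equivalence, stated over arbitrary dicts with Nodup keys and arbitrary fill rows
theorem merge_core (d1 d2 : PySem.Dict String (List String))
    (h1 : d1.keys.Nodup) (h2 : d2.keys.Nodup)
    (fill1 fill2 : List String) (subset : Bool) :
    (if !subset then
        d2.keys.foldl (fun e k => if d1.contains k then e else e.insert k (fill1 ++ d2.getD k []))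
          (d1.keys.foldl (fun e k =>
              if d2.contains k then e.insert k (d1.getD k [] ++ d2.getD k [])
              else if !subset then e.insert k (d1.getD k [] ++ fill2) else e)
            PySem.Dict.empty)
      else
        d1.keys.foldl (fun e k =>
            if d2.contains k then e.insert k (d1.getD k [] ++ d2.getD k [])
            else if !subset then e.insert k (d1.getD k [] ++ fill2) else e)
          PySem.Dict.empty).items
    =
    (if subset then
        (d1.items.foldl (fun e p =>
            if d2.contains p.1 then e.insert p.1 (p.2 ++ d2.getD p.1 []) else e)
          PySem.Dict.empty).items
      else
        (((d2.keys.foldl (fun e k => if !d1.contains k then e.insert k fill1 else e) PySem.Dict.empty).items.foldl (fun d p => d.insert p.1 p.2) d1).keys.foldl (fun e k => e.insert k (((d2.keys.foldl (fun e k => if !d1.contains k then e.insert k fill1 else e) PySem.Dict.empty).items.foldl (fun d p => d.insert p.1 p.2) d1).getD k [] ++ ((d1.keys.foldl (fun e k => if !d2.contains k then e.insert k fill2 else e) PySem.Dict.empty).items.foldl (fun d p => d.insert p.1 p.2) d2).getD k [])) PySem.Dict.empty).items) := by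
  have hK2f_not1 : ∀ k ∈ d2.keys.filter (fun k => !d1.contains k), d1.contains k = false := by
    intro k hk
    have := List.of_mem_filter hk
    simpa using this
  have hK1f_not2 : ∀ k ∈ d1.keys.filter (fun k => !d2.contains k), d2.contains k = false := by
    intro k hk
    have := List.of_mem_filter hk
    simpa using this
  have hK2f_nodup : (d2.keys.filter (fun k => !d1.contains k)).Nodup := h2.filter _
  have hK1f_nodup : (d1.keys.filter (fun k => !d2.contains k)).Nodup := h1.filter _
  have hU_nodup : (d1.keys ++ d2.keys.filter (fun k => !d1.contains k)).Nodup := by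
    refine List.Nodup.append h1 hK2f_nodup ?_
    intro k hk1 hk2
    have := (PySem.Dict.contains_iff_mem_keys d1 k).mpr hk1
    rw [hK2f_not1 k hk2] at this
    exact Bool.false_ne_true this
  have hV_nodup : (d2.keys ++ d1.keys.filter (fun k => !d2.contains k)).Nodup := by
    refine List.Nodup.append h2 hK1f_nodup ?_
    intro k hk2 hk1
    have := (PySem.Dict.contains_iff_mem_keys d2 k).mpr hk2
    rw [hK1f_not2 k hk1] at this
    exact Bool.false_ne_true this
  cases subset with
  | true =>
    simp only [Bool.not_true, Bool.false_eq_true, if_false, if_true]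
    rw [PySem.Dict.items_eq_map_keys d1 h1 [], List.foldl_map]
  | false =>
    simp only [Bool.not_false, Bool.false_eq_true, if_true, if_false]
    -- padded tables: items and keys
    rw [pad_items d1 d2 fill1 h2, pad_items d2 d1 fill2 h1]
    have ht1items := union_items d1 (d2.keys.filter (fun k => !d1.contains k)) fill1
      hK2f_nodup hK2f_not1
    have ht2items := union_items d2 (d1.keys.filter (fun k => !d2.contains k)) fill2
      hK1f_nodup hK1f_not2
    have ht1keys : (((d2.keys.filter (fun k => !d1.contains k)).map (fun k => (k, fill1))).foldl
        (fun d p => d.insert p.1 p.2) d1).keys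
        = d1.keys ++ d2.keys.filter (fun k => !d1.contains k) := by
      show (((d2.keys.filter (fun k => !d1.contains k)).map (fun k => (k, fill1))).foldl
        (fun d p => d.insert p.1 p.2) d1).items.map Prod.fst = _
      rw [ht1items, List.map_append, List.map_map]
      have hcomp : (Prod.fst ∘ fun k : String => (k, fill1)) = id := rfl
      rw [hcomp, List.map_id]
      rfl
    have ht2keys : (((d1.keys.filter (fun k => !d2.contains k)).map (fun k => (k, fill2))).foldl
        (fun d p => d.insert p.1 p.2) d2).keys
        = d2.keys ++ d1.keys.filter (fun k => !d2.contains k) := by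
      show (((d1.keys.filter (fun k => !d2.contains k)).map (fun k => (k, fill2))).foldl
        (fun d p => d.insert p.1 p.2) d2).items.map Prod.fst = _
      rw [ht2items, List.map_append, List.map_map]
      have hcomp : (Prod.fst ∘ fun k : String => (k, fill2)) = id := rfl
      rw [hcomp, List.map_id]
      rfl
    -- lookups in the padded tables
    have ht1get1 : ∀ k ∈ d1.keys,
        (((d2.keys.filter (fun k => !d1.contains k)).map (fun k => (k, fill1))).foldl
          (fun d p => d.insert p.1 p.2) d1).getD k [] = d1.getD k [] := by
      intro k hk
      refine PySem.Dict.getD_of_mem_items _ ?_ ?_ []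
      · rw [ht1items]
        refine List.mem_append_left _ ?_
        rw [PySem.Dict.items_eq_map_keys d1 h1 []]
        exact List.mem_map_of_mem hk
      · rw [ht1keys]
        exact hU_nodup
    have ht1get2 : ∀ k ∈ d2.keys.filter (fun k => !d1.contains k),
        (((d2.keys.filter (fun k => !d1.contains k)).map (fun k => (k, fill1))).foldl
          (fun d p => d.insert p.1 p.2) d1).getD k [] = fill1 := by
      intro k hk
      refine PySem.Dict.getD_of_mem_items _ ?_ ?_ []
      · rw [ht1items]
        exact List.mem_append_right _ (List.mem_map_of_mem hk)
      · rw [ht1keys]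
        exact hU_nodup
    have ht2get_in : ∀ k, d2.contains k = true →
        (((d1.keys.filter (fun k => !d2.contains k)).map (fun k => (k, fill2))).foldl
          (fun d p => d.insert p.1 p.2) d2).getD k [] = d2.getD k [] := by
      intro k hk
      refine PySem.Dict.getD_of_mem_items _ ?_ ?_ []
      · rw [ht2items]
        refine List.mem_append_left _ ?_
        rw [PySem.Dict.items_eq_map_keys d2 h2 []]
        exact List.mem_map_of_mem ((PySem.Dict.contains_iff_mem_keys d2 k).mp hk)
      · rw [ht2keys]
        exact hV_nodup
    have ht2get_out : ∀ k ∈ d1.keys.filter (fun k => !d2.contains k),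
        (((d1.keys.filter (fun k => !d2.contains k)).map (fun k => (k, fill2))).foldl
          (fun d p => d.insert p.1 p.2) d2).getD k [] = fill2 := by
      intro k hk
      refine PySem.Dict.getD_of_mem_items _ ?_ ?_ []
      · rw [ht2items]
        exact List.mem_append_right _ (List.mem_map_of_mem hk)
      · rw [ht2keys]
        exact hV_nodup
    -- reduce the A side: fuse the first loop, filter the second, take items
    have hD1items : (d1.keys.foldl (fun e k =>
          e.insert k (d1.getD k [] ++ (if d2.contains k then d2.getD k [] else fill2)))
          PySem.Dict.empty).items
        = d1.keys.map (fun k => (k, d1.getD k [] ++ (if d2.contains k then d2.getD k [] else fill2))) := by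
      have := PySem.Dict.items_foldl_insert_fresh d1.keys (fun k => k)
        (fun k => d1.getD k [] ++ (if d2.contains k then d2.getD k [] else fill2)) PySem.Dict.empty
        (fun a _ => PySem.Dict.contains_empty a) (by simpa using h1)
      simpa using this
    have hD1keys : (d1.keys.foldl (fun e k =>
          e.insert k (d1.getD k [] ++ (if d2.contains k then d2.getD k [] else fill2)))
          PySem.Dict.empty).keys = d1.keys := by
      show ((d1.keys.foldl _ PySem.Dict.empty).items).map Prod.fst = d1.keys
      rw [hD1items, List.map_map]
      have hcomp : (Prod.fst ∘ fun k : String =>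
          (k, d1.getD k [] ++ (if d2.contains k then d2.getD k [] else fill2))) = id := rfl
      rw [hcomp, List.map_id]
    rw [branch_insert_fuse d1 d2 fill2 PySem.Dict.empty, skip_to_filter d1 d2 fill1 _]
    rw [PySem.Dict.items_foldl_insert_fresh (d2.keys.filter (fun k => !d1.contains k)) (fun k => k)
        (fun k => fill1 ++ d2.getD k [])
        (d1.keys.foldl (fun e k =>
          e.insert k (d1.getD k [] ++ (if d2.contains k then d2.getD k [] else fill2)))
          PySem.Dict.empty)
        ?fresh (by simpa using hK2f_nodup)]
    case fresh =>
      intro a ha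
      rcases h : (d1.keys.foldl (fun e k =>
          e.insert k (d1.getD k [] ++ (if d2.contains k then d2.getD k [] else fill2)))
          PySem.Dict.empty).contains a with _ | _
      · exact h
      · exfalso
        have hmem := (PySem.Dict.contains_iff_mem_keys _ a).mp h
        rw [hD1keys] at hmem
        have := (PySem.Dict.contains_iff_mem_keys d1 a).mpr hmem
        rw [hK2f_not1 a ha] at this
        exact Bool.false_ne_true this
    rw [hD1items]
    -- reduce the B side: one insert loop over the padded key list
    rw [ht1keys]
    rw [PySem.Dict.items_foldl_insert_fresh
        (d1.keys ++ d2.keys.filter (fun k => !d1.contains k)) (fun k => k)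
        (fun k =>
          (((d2.keys.filter (fun k => !d1.contains k)).map (fun k => (k, fill1))).foldl
            (fun d p => d.insert p.1 p.2) d1).getD k [] ++
          (((d1.keys.filter (fun k => !d2.contains k)).map (fun k => (k, fill2))).foldl
            (fun d p => d.insert p.1 p.2) d2).getD k [])
        PySem.Dict.empty (fun a _ => PySem.Dict.contains_empty a) (by simpa using hU_nodup)]
    simp only [PySem.Dict.empty, List.nil_append, List.map_append]
    congr 1
    · refine List.map_congr_left ?_
      intro k hk
      rw [ht1get1 k hk]
      by_cases h2k : d2.contains k = true
      · simp only [h2k, if_true]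
        rw [ht2get_in k h2k]
      · have h2f : d2.contains k = false := by simpa using h2k
        simp only [h2f, Bool.false_eq_true, if_false]
        rw [ht2get_out k (List.mem_filter.mpr ⟨hk, by simp [h2f]⟩)]
    · refine List.map_congr_left ?_
      intro k hk
      have h2k : d2.contains k = true :=
        (PySem.Dict.contains_iff_mem_keys d2 k).mpr (List.mem_of_mem_filter hk)
      rw [ht1get2 k hk, ht2get_in k h2k]

-- ===== VERDICT =====
theorem merge_spec : Claim_equal_merge := by
  intro entries1 count1 entries2 count2 subset default _
  unfold Spec_merge
  exact merge_core (PySem.Dict.ofList entries1) (PySem.Dict.ofList entries2)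
    (PySem.Dict.nodup_keys_ofList entries1) (PySem.Dict.nodup_keys_ofList entries2) _ _ subset
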